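-- pv_equiv track=rewrite | github.com/amphionspace/audiollm-server | backend/main.py | _sanitize_hotwords
-- ===== SOURCE A (Python) =====
-- HOTWORD_LIMIT = 30
--
-- def _sanitize_hotwords(words) -> list[str]:
--     if not isinstance(words, list):
--         return []
--     cleaned: list[str] = []
--     for item in words:
--         if not isinstance(item, str):
--             continue
--         value = item.strip()
--         if not value or value in cleaned:
--             continue
--         cleaned.append(value)
--         if len(cleaned) >= HOTWORD_LIMIT:
--             break
--     return cleaned
-- ===== SOURCE B (Python) =====
-- HOTWORD_LIMIT = 30
--
-- def _sanitize_hotwords(words) -> list[str]: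
--     if not isinstance(words, list):
--         return []
--     remaining = [w.strip() for w in words if isinstance(w, str)]
--     remaining = [v for v in remaining if v]
--     out: list[str] = []
--     while remaining and len(out) < HOTWORD_LIMIT:
--         head = remaining[0]
--         out.append(head)
--         remaining = [v for v in remaining[1:] if v != head]
--     return out
-- ===== Notes on version B (the rewrite author's own statement) =====
-- stated objective: alternative
-- what changed: Replaced A's single accumulator loop with in-list membership tests and an early break by a sieve: strip/filter once, then repeatedly take the head of the remaining list and filter all its later occurrences out of it until the limit is reached; dedup is done by shrinking the input, not by membership tests against the output.
import Mathlib
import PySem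

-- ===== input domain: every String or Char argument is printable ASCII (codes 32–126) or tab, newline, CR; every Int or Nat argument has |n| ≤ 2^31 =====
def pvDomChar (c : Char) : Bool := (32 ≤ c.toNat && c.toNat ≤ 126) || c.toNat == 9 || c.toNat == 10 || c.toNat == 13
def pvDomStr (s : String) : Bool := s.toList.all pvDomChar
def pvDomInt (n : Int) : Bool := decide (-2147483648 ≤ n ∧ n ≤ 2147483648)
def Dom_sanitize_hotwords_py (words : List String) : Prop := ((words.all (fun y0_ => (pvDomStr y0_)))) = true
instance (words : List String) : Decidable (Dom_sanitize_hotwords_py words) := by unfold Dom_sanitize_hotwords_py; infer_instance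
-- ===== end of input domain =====

-- B replaces A's accumulator loop (membership test + early break) by a sieve: strip/filter,
-- then repeatedly take the head and filter its duplicates out of the rest, slice to the limit;
-- objective: alternative (same result by a different algorithm).

def HOTWORD_LIMIT : Nat := 30

-- ===== PORT A =====
-- the 'for item in words' loop of A, with its early break at HOTWORD_LIMIT
def pvLoopA : List String → List String → List String
  | [], cleaned => cleaned
  | item :: rest, cleaned =>
    let value := PySem.Str.strip item
    if value = "" ∨ cleaned.contains value then
      pvLoopA rest cleaned
    else
      let cleaned' := cleaned ++ [value]
      if HOTWORD_LIMIT ≤ cleaned'.length then cleaned' else pvLoopA rest cleaned'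

def sanitize_hotwords_py (words : List String) : List String :=
  pvLoopA words []

-- ===== PORT B =====
-- the 'while remaining and len(out) < HOTWORD_LIMIT' sieve of Source B:
-- out grows by the head, remaining loses that head's duplicates
def pvSieveB : List String → List String → List String
  | out, [] => out
  | out, head :: rest =>
    if HOTWORD_LIMIT ≤ out.length then out
    else pvSieveB (out ++ [head]) (rest.filter (fun v => v != head))
termination_by _ remaining => remaining.length
decreasing_by simpa using Nat.lt_succ_of_le (List.length_filter_le _ _)

def sanitize_hotwords_py_alt (words : List String) : List String :=
  let remaining := (words.map PySem.Str.strip).filter (fun v => v != "")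
  pvSieveB [] remaining

-- ===== PRECONDITION & SPEC =====
def Spec_sanitize_hotwords_py (words : List String) (out : List String) : Prop := out = sanitize_hotwords_py_alt words
instance (words : List String) (out : List String) : Decidable (Spec_sanitize_hotwords_py words out) := by unfold Spec_sanitize_hotwords_py; infer_instance

-- ===== CLAIM (what is proved, stated in full; the proofs are below) =====
def Claim_equal_sanitize_hotwords_py : Prop := ∀ (words : List String), Dom_sanitize_hotwords_py words → Spec_sanitize_hotwords_py words (sanitize_hotwords_py words)

-- ===== LEMMAS AND PROOFS =====

-- A's loop from accumulator c (< limit) is: add the fresh stripped candidates after c,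
-- capped at HOTWORD_LIMIT — i.e. take 30 of the set-update of c.
theorem pvLoopA_eq_update_take (ws : List String) (c : List String)
    (hc : c.length < HOTWORD_LIMIT) :
    pvLoopA ws c =
      (PySem.Set.update c ((ws.map PySem.Str.strip).filter (fun v => v != ""))).take HOTWORD_LIMIT := by
  induction ws generalizing c with
  | nil =>
    simp [pvLoopA, PySem.Set.update, List.take_of_length_le (Nat.le_of_lt hc)]
  | cons w ws ih =>
    by_cases hv : PySem.Str.strip w = ""
    · simp [pvLoopA, hv, ih c hc]
    · by_cases hmem : PySem.Str.strip w ∈ c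
      · have hcont : c.contains (PySem.Str.strip w) = true := by
          simpa using hmem
        simp only [pvLoopA, List.map_cons, List.filter_cons, hv, hcont]
        rw [ih c hc]
        simp [PySem.Set.update_cons, PySem.Set.add_of_mem hmem, hv]
      · have hcont : c.contains (PySem.Str.strip w) = false := by
          simpa using hmem
        simp only [pvLoopA, List.map_cons, List.filter_cons, hv, hcont]
        rw [if_neg (by simp)]
        have hupd : PySem.Set.update c (PySem.Str.strip w ::
            ((ws.map PySem.Str.strip).filter (fun v => v != ""))) =
            PySem.Set.update (c ++ [PySem.Str.strip w])
              ((ws.map PySem.Str.strip).filter (fun v => v != "")) := by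
          rw [PySem.Set.update_cons, PySem.Set.add_of_not_mem hmem]
        by_cases hlen : HOTWORD_LIMIT ≤ (c ++ [PySem.Str.strip w]).length
        · rw [if_pos hlen]
          have hlen30 : (c ++ [PySem.Str.strip w]).length = HOTWORD_LIMIT := by
            simp only [HOTWORD_LIMIT, List.length_append, List.length_cons, List.length_nil] at hlen hc ⊢
            omega
          rw [if_pos (show (PySem.Str.strip w != "") = true by simp [hv]), hupd,
              PySem.Set.update_eq_append_filter,
              List.take_append_of_le_length (Nat.le_of_eq hlen30.symm),
              List.take_of_length_le (Nat.le_of_eq hlen30)]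
        · rw [if_neg hlen]
          have hlt : (c ++ [PySem.Str.strip w]).length < HOTWORD_LIMIT := Nat.lt_of_not_le hlen
          rw [ih _ hlt, if_pos (show (PySem.Str.strip w != "") = true by simp [hv]), hupd]

-- folding Set.add over a list ignores the occurrences of an element already in the accumulator
theorem foldl_add_filter_ne (t : List String) (s : List String) (h : String) (hs : h ∈ s) :
    (t.filter (fun v => v != h)).foldl PySem.Set.add s = t.foldl PySem.Set.add s := by
  induction t generalizing s with
  | nil => rfl
  | cons x t ih =>
    by_cases hx : x = h
    · subst hx
      simp only [List.filter_cons, bne_self_eq_false, List.foldl_cons,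
        PySem.Set.add_of_mem hs]
      exact ih s hs
    · simp only [List.filter_cons, show (x != h) = true by simpa using hx, List.foldl_cons]
      exact ih _ (by rw [PySem.Set.mem_add]; exact Or.inl hs)

-- the capped sieve from an accumulator disjoint from the rest is take-30 of the set-update
theorem pvSieveB_eq_aux (n : Nat) : ∀ (out rem : List String), rem.length ≤ n →
    (∀ x ∈ rem, x ∉ out) → out.length ≤ HOTWORD_LIMIT →
    pvSieveB out rem = (PySem.Set.update out rem).take HOTWORD_LIMIT := by
  have hupdfold : ∀ (s xs : List String), PySem.Set.update s xs = xs.foldl PySem.Set.add s :=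
    fun _ _ => rfl
  induction n with
  | zero =>
    intro out rem hlen _ hout
    match rem with
    | [] => simp [pvSieveB, PySem.Set.update_nil, List.take_of_length_le hout]
  | succ n ih =>
    intro out rem hlen hdisj hout
    match rem with
    | [] => simp [pvSieveB, PySem.Set.update_nil, List.take_of_length_le hout]
    | head :: rest =>
      have hh : head ∉ out := hdisj head (List.mem_cons_self)
      have happ : out ++ [head] = PySem.Set.add out head :=
        (PySem.Set.add_of_not_mem hh).symm
      rw [pvSieveB]
      by_cases hfull : HOTWORD_LIMIT ≤ out.length
      · have h30 : out.length = HOTWORD_LIMIT := Nat.le_antisymm hout hfull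
        rw [if_pos hfull, PySem.Set.update_eq_append_filter, List.take_append, h30,
          List.take_of_length_le (Nat.le_of_eq h30), Nat.sub_self, List.take_zero,
          List.append_nil]
      · rw [if_neg hfull]
        rw [ih (out ++ [head]) (rest.filter (fun v => v != head))
          (Nat.le_trans (List.length_filter_le _ _) (Nat.le_of_succ_le_succ hlen))
          (by
            intro x hx
            have hx' := List.mem_filter.mp hx
            have hne : x ≠ head := by simpa using hx'.2
            simp only [List.mem_append, List.mem_singleton]
            exact fun hc => hc.elim (hdisj x (List.mem_cons_of_mem _ hx'.1)) hne)
          (by simpa using Nat.lt_of_not_le hfull)]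
        rw [hupdfold, foldl_add_filter_ne _ _ head (by simp),
          happ]
        rfl

theorem pvSieveB_eq (out rem : List String) (hdisj : ∀ x ∈ rem, x ∉ out)
    (hout : out.length ≤ HOTWORD_LIMIT) :
    pvSieveB out rem = (PySem.Set.update out rem).take HOTWORD_LIMIT :=
  pvSieveB_eq_aux rem.length out rem (Nat.le_refl _) hdisj hout

-- ===== VERDICT (by name: the statement is the Claim_ definition above) =====
theorem sanitize_hotwords_py_spec : Claim_equal_sanitize_hotwords_py := by
  intro words _
  unfold Spec_sanitize_hotwords_py sanitize_hotwords_py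
  simp only [sanitize_hotwords_py_alt]
  rw [pvLoopA_eq_update_take _ _ (by simp [HOTWORD_LIMIT]),
      pvSieveB_eq _ _ (by intro x hx; simp) (by simp [HOTWORD_LIMIT])]
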